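-- pv_equiv track=rewrite | github.com/subhamrex/Coding_Practice | Python/minLetterInString.py | solution
-- ===== SOURCE A (Python) =====
-- def solution(A):
--     char_A = 'A'
--     num_Bs =0
--     min_dels=0
--     for c in A:
--         if char_A ==c:
--             min_dels = min(num_Bs, min_dels+1)
--         else:
--             num_Bs +=1
--     return min_dels
-- ===== SOURCE B (Python) =====
-- def solution(A):
--     # min deletions so every kept 'A' precedes every kept non-'A':
--     # minimum over all boundaries of (non-'A' seen before) + ('A's after).
--     totalA = A.count('A')
--     seenA = 0
--     seenB = 0
--     best = totalA
--     for c in A: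
--         if c == 'A':
--             seenA += 1
--         else:
--             seenB += 1
--         best = min(best, seenB + totalA - seenA)
--     return best
-- ===== Notes on version B (the rewrite author's own statement) =====
-- stated objective: alternative
-- what changed: Replaces A's DP recurrence min(num_Bs, min_dels+1) by counting total 'A's once and taking the minimum boundary cost seenB + (totalA - seenA) over all split points.
import Mathlib
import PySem

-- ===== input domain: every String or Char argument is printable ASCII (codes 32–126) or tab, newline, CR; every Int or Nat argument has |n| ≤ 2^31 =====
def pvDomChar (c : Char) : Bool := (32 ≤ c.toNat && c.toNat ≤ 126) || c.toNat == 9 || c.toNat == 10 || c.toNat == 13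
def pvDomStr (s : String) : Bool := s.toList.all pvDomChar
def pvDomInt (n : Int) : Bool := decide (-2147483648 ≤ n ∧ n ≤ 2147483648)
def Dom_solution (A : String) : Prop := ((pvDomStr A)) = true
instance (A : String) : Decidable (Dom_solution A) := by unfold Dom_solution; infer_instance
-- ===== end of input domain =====

-- B is an alternative linear algorithm: minimum boundary cost instead of A's DP recurrence.

-- ===== PORT A =====
-- loop state: (num_Bs, min_dels)
def solStepA (s : Int × Int) (c : Char) : Int × Int :=
  if 'A' = c then (s.1, min s.1 (s.2 + 1)) else (s.1 + 1, s.2)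

def solution (A : String) : Int :=
  (A.toList.foldl solStepA (0, 0)).2

-- ===== PORT B =====
-- loop state: (seenA, seenB, best), with totalA fixed
def solStepB (totalA : Int) (s : Int × Int × Int) (c : Char) : Int × Int × Int :=
  if c = 'A' then (s.1 + 1, s.2.1, min s.2.2 (s.2.1 + totalA - (s.1 + 1)))
  else (s.1, s.2.1 + 1, min s.2.2 (s.2.1 + 1 + totalA - s.1))

def solution_alt (A : String) : Int :=
  let totalA : Int := (A.toList.count 'A' : Nat)
  (A.toList.foldl (solStepB totalA) (0, 0, totalA)).2.2

-- ===== PRECONDITION & SPEC =====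
def Spec_solution (A : String) (out : Int) : Prop := out = solution_alt A
instance (A : String) (out : Int) : Decidable (Spec_solution A out) := by unfold Spec_solution; infer_instance

-- ===== CLAIM (what is proved, stated in full; the proofs are below) =====
def Claim_equal_solution : Prop := ∀ (A : String), Dom_solution A → Spec_solution A (solution A)

-- ===== LEMMAS AND PROOFS =====

/-- count of 'A' in a list, as an Int -/
def aCnt (l : List Char) : Int := (l.count 'A' : Nat)

/-- minimum deletions to make the string match A*B* (non-'A' counts as B), left recursion -/
def fmin : List Char → Int
  | [] => 0
  | c :: l => if c = 'A' then fmin l else min (1 + fmin l) (aCnt l)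

theorem aCnt_cons (c : Char) (l : List Char) :
    aCnt (c :: l) = (if c = 'A' then (1:Int) else 0) + aCnt l := by
  by_cases h : c = 'A' <;> simp [aCnt, List.count_cons, h] <;> push_cast <;> ring

theorem fmin_le_aCnt (l : List Char) : fmin l ≤ aCnt l := by
  induction l with
  | nil => simp [fmin, aCnt]
  | cons c l ih =>
    have h0 : (0:Int) ≤ aCnt l := by simp [aCnt]
    rw [aCnt_cons]
    by_cases h : c = 'A' <;> simp [fmin, h] <;> omega

theorem foldl_A (l : List Char) : ∀ (b m : Int), m ≤ b →
    (l.foldl solStepA (b, m)).2 = min (m + aCnt l) (b + fmin l) := by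
  induction l with
  | nil => intro b m hmb; simp [aCnt, fmin]; omega
  | cons c l ih =>
    intro b m hmb
    have hf := fmin_le_aCnt l
    by_cases h : c = 'A'
    · subst h
      have : solStepA (b, m) 'A' = (b, min b (m + 1)) := by simp [solStepA]
      rw [List.foldl_cons, this, ih b (min b (m+1)) (min_le_left _ _),
        aCnt_cons]
      simp [fmin]
      omega
    · have hne : ¬ ('A' = c) := fun hh => h hh.symm
      have : solStepA (b, m) c = (b + 1, m) := by simp [solStepA, hne]
      rw [List.foldl_cons, this, ih (b+1) m (by omega), aCnt_cons]
      simp [fmin, h]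
      omega

theorem foldl_B (l : List Char) : ∀ (t sa sb best : Int),
    t = sa + aCnt l → best ≤ sb + aCnt l →
    (l.foldl (solStepB t) (sa, sb, best)).2.2 = min best (sb + fmin l) := by
  induction l with
  | nil => intro t sa sb best ht hb; simp [aCnt, fmin] at *; omega
  | cons c l ih =>
    intro t sa sb best ht hb
    have hf := fmin_le_aCnt l
    rw [aCnt_cons] at ht hb
    by_cases h : c = 'A'
    · rw [if_pos h] at ht hb
      have hstep : solStepB t (sa, sb, best) 'A' =
          (sa + 1, sb, min best (sb + t - (sa + 1))) := by
        simp [solStepB]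
      rw [List.foldl_cons, h, hstep,
        ih t (sa+1) sb _ (by omega) (by omega)]
      simp [fmin]
      omega
    · rw [if_neg h] at ht hb
      have hstep : solStepB t (sa, sb, best) c =
          (sa, sb + 1, min best (sb + 1 + t - sa)) := by
        simp [solStepB, h]
      rw [List.foldl_cons, hstep,
        ih t sa (sb+1) _ (by omega) (by omega)]
      simp [fmin, h]
      omega

-- ===== VERDICT (by name: the statement is the Claim_ definition above) =====
theorem solution_spec : Claim_equal_solution := by
  intro A _
  unfold Spec_solution solution solution_alt
  have hf := fmin_le_aCnt A.toList
  show (A.toList.foldl solStepA (0,0)).2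
      = (A.toList.foldl (solStepB (aCnt A.toList)) (0, 0, aCnt A.toList)).2.2
  rw [foldl_A A.toList 0 0 le_rfl,
    foldl_B A.toList (aCnt A.toList) 0 0 (aCnt A.toList) (by omega) (by omega)]
  omega
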